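-- pv_equiv track=rewrite | github.com/enjector/microgpt-c | demos/character-level/mastermind/generate_corpus.py | generate_player_corpus
-- ===== SOURCE A (Python) =====
-- def feedback_to_str(history):
--     """Convert history to compact feedback string."""
--     parts = []
--     for guess, b, w in history:
--         parts.append(f"{guess}:B{b}W{w}")
--     return ','.join(parts)
--
-- def generate_player_corpus(traces):
--     """Player: feedback history → next guess.
--
--     Output is ONLY a 4-char code like "ABCD".
--     """
--     entries = []
--     seen = set()
--
--     for secret, history in traces:
--         for turn_idx in range(len(history)):
--             guess, b, w = history[turn_idx]
--
--             if turn_idx == 0: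
--                 prompt = "feedback=none"
--             else:
--                 fb = feedback_to_str(history[:turn_idx])
--                 prompt = f"feedback={fb}"
--
--             # Truncate prompt if too long
--             if len(prompt) > 100:
--                 prompt = prompt[:100]
--
--             if prompt not in seen:
--                 entries.append(f"{prompt}\n{guess}")
--                 seen.add(prompt)
--
--             # Blocked variant: if we have subsequent guesses
--             if turn_idx + 1 < len(history):
--                 next_guess = history[turn_idx + 1][0]
--                 fb_so_far = feedback_to_str(history[:turn_idx + 1])
--                 prompt_b = f"feedback={fb_so_far}|blocked={guess}"
--                 if len(prompt_b) > 100: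
--                     prompt_b = prompt_b[:100]
--                 if prompt_b not in seen:
--                     entries.append(f"{prompt_b}\n{next_guess}")
--                     seen.add(prompt_b)
--
--     return entries
-- ===== SOURCE B (Python) =====
-- def generate_player_corpus(traces):
--     """Player: feedback history -> next guess.
--
--     Two-phase rewrite: phase 1 streams out all candidate (prompt, guess)
--     pairs per trace, building the feedback string incrementally instead of
--     re-slicing and re-joining the history each turn; phase 2 is a separate
--     first-occurrence dedup pass over that flat list.
--     """
--     cands = []
--     for secret, history in traces:
--         fb = ""
--         first = True
--         rest = history
--         while rest:
--             guess, b, w = rest[0]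
--             rest = rest[1:]
--             prompt = ("feedback=none" if first else "feedback=" + fb)[:100]
--             cands.append((prompt, guess))
--             part = f"{guess}:B{b}W{w}"
--             fb = part if first else fb + "," + part
--             first = False
--             if rest:
--                 cands.append((("feedback=" + fb + "|blocked=" + guess)[:100], rest[0][0]))
--     entries, seen = [], set()
--     for p, g in cands:
--         if p not in seen:
--             seen.add(p)
--             entries.append(f"{p}\n{g}")
--     return entries
-- ===== Notes on version B (the rewrite author's own statement) =====
-- stated objective: faster
-- what changed: Replaces A's single interleaved generate-and-dedup loop (which re-slices and re-joins the whole history prefix at every turn) by two separate passes: one pass that streams out a flat candidate (prompt, guess) list while extending the feedback string incrementally by one part per turn, then a distinct first-occurrence dedup pass over that flat list.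
import Mathlib
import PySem

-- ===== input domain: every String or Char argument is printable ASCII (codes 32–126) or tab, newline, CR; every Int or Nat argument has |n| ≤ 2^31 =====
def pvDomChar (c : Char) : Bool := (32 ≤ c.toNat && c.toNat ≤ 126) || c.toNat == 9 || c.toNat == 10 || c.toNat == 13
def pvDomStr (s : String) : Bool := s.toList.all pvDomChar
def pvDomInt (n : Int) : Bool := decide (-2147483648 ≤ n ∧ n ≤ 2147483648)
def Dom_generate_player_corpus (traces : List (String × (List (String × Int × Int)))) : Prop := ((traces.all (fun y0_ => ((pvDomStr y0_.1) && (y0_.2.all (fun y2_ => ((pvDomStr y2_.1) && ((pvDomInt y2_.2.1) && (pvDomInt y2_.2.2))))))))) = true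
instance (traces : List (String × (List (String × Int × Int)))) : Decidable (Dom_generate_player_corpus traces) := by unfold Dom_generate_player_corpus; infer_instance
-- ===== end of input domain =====

-- B differs from A by decomposition: one flat candidate-generation pass with an
-- incrementally built feedback string, then a separate first-occurrence dedup pass
-- (A interleaves generation with dedup and re-slices/re-joins the history each turn).

-- ===== PORT A =====
-- f"{guess}:B{b}W{w}" (shared f-string expression of both Pythons)
def pvPart (t : String × Int × Int) : List Char :=
  t.1.toList ++ ':' :: 'B' :: PySem.Int.toChars t.2.1 ++ 'W' :: PySem.Int.toChars t.2.2

-- A's helper feedback_to_str: append each part, then ','.join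
def feedback_to_str (history : List (String × Int × Int)) : List Char :=
  PySem.Chars.join [','] (history.foldl (fun parts t => parts ++ [pvPart t]) [])

def generate_player_corpus (traces : List (String × (List (String × Int × Int)))) : List String :=
  (traces.foldl (fun (st : List String × PySem.Set (List Char)) tr =>
    let history := tr.2
    (PySem.List.pyRange 0 (history.length) 1).foldl (fun st j =>
      let t := PySem.List.pyGetD history j ("", 0, 0)
      let guess := t.1
      let prompt := if j = 0 then "feedback=none".toList
        else "feedback=".toList ++ feedback_to_str (PySem.List.slice history none (some j))
      let prompt := if 100 < prompt.length then PySem.List.slice prompt none (some 100) else prompt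
      let st := if st.2.contains prompt then st
        else (st.1 ++ [String.ofList (prompt ++ '\n' :: guess.toList)], st.2.add prompt)
      if j + 1 < (history.length : Int) then
        let next_guess := (PySem.List.pyGetD history (j + 1) ("", 0, 0)).1
        let fb_so_far := feedback_to_str (PySem.List.slice history none (some (j + 1)))
        let prompt_b := "feedback=".toList ++ fb_so_far ++ "|blocked=".toList ++ guess.toList
        let prompt_b := if 100 < prompt_b.length then PySem.List.slice prompt_b none (some 100) else prompt_b
        if st.2.contains prompt_b then st
        else (st.1 ++ [String.ofList (prompt_b ++ '\n' :: next_guess.toList)], st.2.add prompt_b)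
      else st) st) ([], PySem.Set.empty)).1

-- ===== PORT B =====
-- prompt[:100]
def pvTrunc (p : List Char) : List Char := PySem.List.slice p none (some 100)

-- B's while-loop over the remaining turns (state: feedback-so-far, first flag)
def pvTraceCands : List Char → Bool → List (String × Int × Int) → List (List Char × String)
  | _, _, [] => []
  | fb, first, t :: rest =>
    let prompt := pvTrunc (if first then "feedback=none".toList else "feedback=".toList ++ fb)
    let part := pvPart t
    let fb2 := if first then part else fb ++ ',' :: part
    (prompt, t.1) ::
      (match rest with
        | [] => []
        | t2 :: _ => [(pvTrunc ("feedback=".toList ++ fb2 ++ "|blocked=".toList ++ t.1.toList), t2.1)]) ++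
      pvTraceCands fb2 false rest

-- phase-2 dedup step ('if p not in seen: seen.add(p); entries.append(f"{p}\n{g}")')
def pvDedupStep (st : List String × PySem.Set (List Char)) (pg : List Char × String) :
    List String × PySem.Set (List Char) :=
  if st.2.contains pg.1 then st
  else (st.1 ++ [String.ofList (pg.1 ++ '\n' :: pg.2.toList)], st.2.add pg.1)

def generate_player_corpus_alt (traces : List (String × (List (String × Int × Int)))) : List String :=
  let cands := traces.foldl (fun acc tr => acc ++ pvTraceCands [] true tr.2) []
  (cands.foldl pvDedupStep ([], PySem.Set.empty)).1

-- ===== PRECONDITION & SPEC =====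
def Spec_generate_player_corpus (traces : List (String × (List (String × Int × Int)))) (out : List String) : Prop := out = generate_player_corpus_alt traces
instance (traces : List (String × (List (String × Int × Int)))) (out : List String) : Decidable (Spec_generate_player_corpus traces out) := by unfold Spec_generate_player_corpus; infer_instance

-- ===== CLAIM (what is proved, stated in full; the proofs are below) =====
def Claim_equal_generate_player_corpus : Prop := ∀ (traces : List (String × (List (String × Int × Int)))), Dom_generate_player_corpus traces → Spec_generate_player_corpus traces (generate_player_corpus traces)

-- ===== LEMMAS AND PROOFS =====

theorem foldl_flatMap {α β γ : Type} (l : List α) (g : α → List β) (f : γ → β → γ) (init : γ) :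
    (l.flatMap g).foldl f init = l.foldl (fun st x => (g x).foldl f st) init := by
  induction l generalizing init with
  | nil => rfl
  | cons x xs ih => simp [List.flatMap_cons, List.foldl_append, ih]

-- the two truncations agree
theorem trunc_eq (p : List Char) :
    (if 100 < p.length then PySem.List.slice p none (some 100) else p) = pvTrunc p := by
  have h : PySem.List.slice p none (some 100) = p.take 100 := by
    simpa using PySem.List.slice_to_natCast p 100
  unfold pvTrunc
  rw [h]
  split_ifs with hl
  · rfl
  · exact (List.take_of_length_le (by omega)).symm

-- feedback_to_str as a join over a map
theorem fbstr_eq (h : List (String × Int × Int)) :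
    feedback_to_str h = PySem.Chars.join [','] (h.map pvPart) := by
  unfold feedback_to_str
  congr 1
  induction h using List.reverseRecOn with
  | nil => rfl
  | append_singleton xs x ih => simp [List.foldl_append, ih]


-- ','.join over a list extended by one part
theorem join_snoc (l : List (List Char)) (p : List Char) :
    PySem.Chars.join [','] (l ++ [p]) = if l = [] then p else PySem.Chars.join [','] l ++ ',' :: p := by
  induction l with
  | nil => simpa using PySem.Chars.join_singleton [','] p
  | cons a l ih =>
    cases l with
    | nil =>
      show PySem.Chars.join [','] (a :: p :: []) = _
      rw [PySem.Chars.join_cons_cons, PySem.Chars.join_singleton, PySem.Chars.join_singleton]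
      simp
    | cons b m =>
      show PySem.Chars.join [','] (a :: b :: (m ++ [p])) = _
      rw [PySem.Chars.join_cons_cons]
      have ihx : PySem.Chars.join [','] (b :: (m ++ [p])) = PySem.Chars.join [','] (b :: m) ++ ',' :: p := by
        have := ih
        simp only [List.cons_append] at this ⊢
        rw [if_neg (by simp)] at this; exact this
      rw [ihx, PySem.Chars.join_cons_cons]
      simp

-- incremental feedback update
theorem fbstr_snoc (pre : List (String × Int × Int)) (t : String × Int × Int) :
    feedback_to_str (pre ++ [t]) =
      if pre = [] then pvPart t else feedback_to_str pre ++ ',' :: pvPart t := by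
  rw [fbstr_eq, fbstr_eq, List.map_append, List.map_singleton, join_snoc]
  by_cases h : pre = []
  · simp [h]
  · rw [if_neg (by simpa using h), if_neg h]

-- A's candidate chunk at one index
def pvChunk (H : List (String × Int × Int)) (j : Int) : List (List Char × String) :=
  let t := PySem.List.pyGetD H j ("", 0, 0)
  let prompt := if j = 0 then "feedback=none".toList
    else "feedback=".toList ++ feedback_to_str (PySem.List.slice H none (some j))
  (pvTrunc prompt, t.1) ::
    (if j + 1 < (H.length : Int) then
      [(pvTrunc ("feedback=".toList ++ feedback_to_str (PySem.List.slice H none (some (j + 1))) ++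
          "|blocked=".toList ++ t.1.toList),
        (PySem.List.pyGetD H (j + 1) ("", 0, 0)).1)]
     else [])

-- A's inner body folds its chunk through the dedup step
theorem inner_body_eq (H : List (String × Int × Int)) (j : Int)
    (st : List String × PySem.Set (List Char)) :
    (let t := PySem.List.pyGetD H j ("", 0, 0)
     let guess := t.1
     let prompt := if j = 0 then "feedback=none".toList
       else "feedback=".toList ++ feedback_to_str (PySem.List.slice H none (some j))
     let prompt := if 100 < prompt.length then PySem.List.slice prompt none (some 100) else prompt
     let st := if st.2.contains prompt then st
       else (st.1 ++ [String.ofList (prompt ++ '\n' :: guess.toList)], st.2.add prompt)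
     if j + 1 < (H.length : Int) then
       let next_guess := (PySem.List.pyGetD H (j + 1) ("", 0, 0)).1
       let fb_so_far := feedback_to_str (PySem.List.slice H none (some (j + 1)))
       let prompt_b := "feedback=".toList ++ fb_so_far ++ "|blocked=".toList ++ guess.toList
       let prompt_b := if 100 < prompt_b.length then PySem.List.slice prompt_b none (some 100) else prompt_b
       if st.2.contains prompt_b then st
       else (st.1 ++ [String.ofList (prompt_b ++ '\n' :: next_guess.toList)], st.2.add prompt_b)
     else st) = (pvChunk H j).foldl pvDedupStep st := by
  by_cases hb : j + 1 < (H.length : Int)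
  · simp only [pvChunk, if_pos hb, List.foldl_cons, List.foldl_nil, pvDedupStep, trunc_eq]
  · simp only [pvChunk, if_neg hb, List.foldl_cons, List.foldl_nil, pvDedupStep, trunc_eq]

-- A's chunks over the index range ARE B's per-trace candidate list
theorem chunks_eq_traceCands (pre rest : List (String × Int × Int)) :
    (PySem.List.pyRange (pre.length) ((pre ++ rest).length) 1).flatMap (pvChunk (pre ++ rest)) =
      pvTraceCands (feedback_to_str pre) (pre.isEmpty) rest := by
  induction rest generalizing pre with
  | nil =>
    rw [List.append_nil, PySem.List.pyRange_one_eq_nil (le_refl _)]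
    rfl
  | cons t rest ih =>
    rw [PySem.List.pyRange_one_cons (by simp), List.flatMap_cons]
    have htail : (PySem.List.pyRange ((pre.length : Int) + 1) ((pre ++ t :: rest).length) 1).flatMap
        (pvChunk (pre ++ t :: rest)) = pvTraceCands (feedback_to_str (pre ++ [t])) false rest := by
      have h := ih (pre ++ [t])
      simp only [List.append_assoc, List.singleton_append, List.length_append,
        List.length_cons, show (pre ++ [t]).isEmpty = false by simp] at h
      rw [← h]
      congr 2
      all_goals first | rfl | (push_cast [List.length_append, List.length_cons]; ring)
    rw [htail]
    have hget : PySem.List.pyGetD (pre ++ t :: rest) ((pre.length : Nat) : Int) ("", 0, 0) = t := by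
      rw [PySem.List.pyGetD_natCast]
      simp [List.getD_eq_getElem?_getD]
    have hslice1 : PySem.List.slice (pre ++ t :: rest) none (some (pre.length : Int)) = pre := by
      rw [PySem.List.slice_to_natCast]; simp
    have hslice2 : PySem.List.slice (pre ++ t :: rest) none (some ((pre.length : Int) + 1)) = pre ++ [t] := by
      have h1 : ((pre.length : Int) + 1) = ((pre.length + 1 : Nat) : Int) := by push_cast; ring
      rw [h1, PySem.List.slice_to_natCast, show pre ++ t :: rest = (pre ++ [t]) ++ rest by simp,
        show pre.length + 1 = (pre ++ [t]).length by simp]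
      exact List.take_left
    have hfb2 : feedback_to_str (pre ++ [t]) =
        if pre.isEmpty then pvPart t else feedback_to_str pre ++ ',' :: pvPart t := by
      rw [fbstr_snoc]; simp [List.isEmpty_iff]
    cases rest with
    | nil =>
      simp only [pvChunk, pvTraceCands, hget, hslice1, hslice2]
      by_cases hp : pre = []
      · subst hp; simp
      · simp [hp]
    | cons t2 rest2 =>
      have hget2 : PySem.List.pyGetD (pre ++ t :: t2 :: rest2) (((pre.length : Nat) : Int) + 1) ("", 0, 0) = t2 := by
        have h1 : ((pre.length : Int) + 1) = ((pre.length + 1 : Nat) : Int) := by push_cast; ring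
        rw [h1, PySem.List.pyGetD_natCast, show pre ++ t :: t2 :: rest2 = (pre ++ [t]) ++ t2 :: rest2 by simp,
          show pre.length + 1 = (pre ++ [t]).length by simp]
        simp [List.getD_eq_getElem?_getD]
      have hfb1 : feedback_to_str [t] = pvPart t := by simpa using fbstr_snoc [] t
      simp only [pvChunk, pvTraceCands, hget, hslice1, hslice2, hget2]
      by_cases hp : pre = []
      · subst hp; simp [hfb1]
      · simp [hfb2, hp]


-- A's whole inner loop as the dedup fold over B's per-trace candidates
theorem inner_fold_eq (H : List (String × Int × Int)) (st : List String × PySem.Set (List Char)) :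
    (PySem.List.pyRange 0 (H.length) 1).foldl (fun st j =>
      let t := PySem.List.pyGetD H j ("", 0, 0)
      let guess := t.1
      let prompt := if j = 0 then "feedback=none".toList
        else "feedback=".toList ++ feedback_to_str (PySem.List.slice H none (some j))
      let prompt := if 100 < prompt.length then PySem.List.slice prompt none (some 100) else prompt
      let st := if st.2.contains prompt then st
        else (st.1 ++ [String.ofList (prompt ++ '\n' :: guess.toList)], st.2.add prompt)
      if j + 1 < (H.length : Int) then
        let next_guess := (PySem.List.pyGetD H (j + 1) ("", 0, 0)).1
        let fb_so_far := feedback_to_str (PySem.List.slice H none (some (j + 1)))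
        let prompt_b := "feedback=".toList ++ fb_so_far ++ "|blocked=".toList ++ guess.toList
        let prompt_b := if 100 < prompt_b.length then PySem.List.slice prompt_b none (some 100) else prompt_b
        if st.2.contains prompt_b then st
        else (st.1 ++ [String.ofList (prompt_b ++ '\n' :: next_guess.toList)], st.2.add prompt_b)
      else st) st = (pvTraceCands [] true H).foldl pvDedupStep st := by
  have h1 := List.foldl_ext (l := PySem.List.pyRange 0 (H.length) 1) _
    (fun st j => (pvChunk H j).foldl pvDedupStep st) st (fun st j _ => inner_body_eq H j st)
  rw [h1, ← foldl_flatMap]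
  have h := chunks_eq_traceCands ([] : List (String × Int × Int)) H
  simp only [List.nil_append, List.length_nil, Nat.cast_zero, List.isEmpty_nil,
    show feedback_to_str [] = ([] : List Char) from rfl] at h
  rw [h]

-- ===== VERDICT (by name: the statement is the Claim_ definition above) =====
theorem generate_player_corpus_spec : Claim_equal_generate_player_corpus := by
  intro traces _
  show generate_player_corpus traces = generate_player_corpus_alt traces
  have hA : generate_player_corpus traces =
      (traces.foldl (fun st tr => (pvTraceCands [] true tr.2).foldl pvDedupStep st)
        ([], PySem.Set.empty)).1 := by
    unfold generate_player_corpus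
    congr 1
    exact List.foldl_ext (l := traces) _ _ _ (fun st tr _ => inner_fold_eq tr.2 st)
  have hB : generate_player_corpus_alt traces =
      (traces.foldl (fun st tr => (pvTraceCands [] true tr.2).foldl pvDedupStep st)
        ([], PySem.Set.empty)).1 := by
    unfold generate_player_corpus_alt
    show ((traces.foldl (fun acc tr => acc ++ pvTraceCands [] true tr.2) []).foldl pvDedupStep
        ([], PySem.Set.empty)).1 = _
    rw [show (traces.foldl (fun acc tr => acc ++ pvTraceCands [] true tr.2) []) =
        traces.flatMap (fun tr => pvTraceCands [] true tr.2) from by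
      simpa using PySem.List.foldl_append_eq_flatMap (fun tr => pvTraceCands [] true tr.2) traces [],
      foldl_flatMap]
  rw [hA, hB]
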